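-- pv_equiv track=rewrite | github.com/dariomonopoli-dev/uzh-inf-summaries | assessment/sem1/info1/exercises/access/Week 8/Week 8 Task 2/week8task2.py | convert_tuple_to_list
-- ===== SOURCE A (Python) =====
-- def convert(t):
--     if isinstance(t,tuple):
--         t_convert = list(t)
--         for index, element in enumerate(t_convert):
--                 t_convert[index] = convert(element)
--     elif isinstance(t,str):
--         t_convert = list(t)
--     else:
--         raise Warning('converison failed')
--     return t_convert
--
-- def convert_tuple_to_list(t):
--     if not isinstance(t,tuple):
--         raise Warning('type error tuple')
--     for element in t:
--         if not isinstance(element,str):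
--             raise Warning('type error string')
--     try:
--         return convert(t)
--     except:
--         raise Warning('conversion failed')
-- ===== SOURCE B (Python) =====
-- def convert_tuple_to_list(t):
--     if not isinstance(t, tuple):
--         raise Warning('type error tuple')
--     for element in t:
--         if not isinstance(element, str):
--             raise Warning('type error string')
--     return [list(s) for s in t]
-- ===== Notes on version B (the rewrite author's own statement) =====
-- stated objective: simpler
-- what changed: Replaced the generic recursive convert helper (which re-dispatches on tuple/str at every level) by a single flat comprehension [list(s) for s in t], valid because the validation guards guarantee every element is a string.
import Mathlib
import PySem

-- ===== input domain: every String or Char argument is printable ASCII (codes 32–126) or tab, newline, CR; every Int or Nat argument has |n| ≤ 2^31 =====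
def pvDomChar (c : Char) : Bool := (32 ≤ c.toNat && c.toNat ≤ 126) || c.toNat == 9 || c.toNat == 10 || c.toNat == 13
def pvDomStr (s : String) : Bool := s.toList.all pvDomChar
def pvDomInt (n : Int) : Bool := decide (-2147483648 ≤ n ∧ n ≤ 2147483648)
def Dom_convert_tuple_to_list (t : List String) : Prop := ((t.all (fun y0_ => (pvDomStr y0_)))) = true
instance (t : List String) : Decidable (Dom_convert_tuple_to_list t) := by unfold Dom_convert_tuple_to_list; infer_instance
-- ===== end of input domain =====

-- B replaces A's generic recursive `convert` helper by one flat comprehension, since the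
-- validation guards already guarantee every element is a string (objective: simpler).

-- ===== PORT A =====
-- A's `convert` on a str: list(s) — each character becomes a 1-char string; recursion over the chars.
def convertStrA : List Char → List String
  | [] => []
  | c :: cs => String.mk [c] :: convertStrA cs

-- A's `convert` on the top tuple: the enumerate loop replacing each element by convert(element);
-- ported as structural recursion over the elements (each element is a str by the guards).
def convertA : List String → List (List String)
  | [] => []
  | s :: rest => convertStrA s.toList :: convertA rest

def convert_tuple_to_list (t : List String) : List (List String) :=
  -- the two isinstance guards always pass on the typed domain (t is a tuple of str), so no Pre_
  convertA t

-- ===== PORT B =====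
def convert_tuple_to_list_alt (t : List String) : List (List String) :=
  t.map (fun s => s.toList.map (fun c => String.mk [c]))

-- ===== PRECONDITION & SPEC =====
def Spec_convert_tuple_to_list (t : List String) (out : List (List String)) : Prop := out = convert_tuple_to_list_alt t
instance (t : List String) (out : List (List String)) : Decidable (Spec_convert_tuple_to_list t out) := by unfold Spec_convert_tuple_to_list; infer_instance

-- ===== CLAIM (what is proved, stated in full; the proofs are below) =====
def Claim_equal_convert_tuple_to_list : Prop := ∀ (t : List String), Dom_convert_tuple_to_list t → Spec_convert_tuple_to_list t (convert_tuple_to_list t)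

-- ===== LEMMAS AND PROOFS =====
theorem convertStrA_eq_map (cs : List Char) :
    convertStrA cs = cs.map (fun c => String.mk [c]) := by
  induction cs with
  | nil => rfl
  | cons c cs ih => simp [convertStrA, ih]

theorem convertA_eq_map (t : List String) :
    convertA t = t.map (fun s => s.toList.map (fun c => String.mk [c])) := by
  induction t with
  | nil => rfl
  | cons s rest ih => simp [convertA, ih, convertStrA_eq_map]

-- ===== VERDICT (by name: the statement is the Claim_ definition above) =====
theorem convert_tuple_to_list_spec : Claim_equal_convert_tuple_to_list := by
  intro t _
  unfold Spec_convert_tuple_to_list convert_tuple_to_list convert_tuple_to_list_alt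
  exact convertA_eq_map t
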